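-- pv_equiv track=rewrite | github.com/erdnase1902/Graph-Hashing | GraphMatching/src/generate_plots.py | get_inflection_points
-- ===== SOURCE A (Python) =====
-- def get_inflection_points(xs,y):
--     x_procs, y_proc = [], []
--     len_y = len(y)
--     for x in xs:
--         assert len(x) == len_y
--         x_procs.append([])
--     last_y = None
--     for i, y_elt in enumerate(y):
--         if y_elt != last_y:
--             for j, x in enumerate(xs):
--                 x_procs[j].append(x[i])
--             # x_proc.append(x_elt)
--             y_proc.append(y_elt)
--             last_y = y_elt
--     for j, x in enumerate(xs):
--         x_procs[j].append(x[-1])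
--     # x_proc.append(x[-1])
--     y_proc.append(y[-1])
--     return x_procs, y_proc
-- ===== SOURCE B (Python) =====
-- def get_inflection_points(xs, y):
--     len_y = len(y)
--     for x in xs:
--         assert len(x) == len_y
--     idx = []
--     last_y = None
--     for i, y_elt in enumerate(y):
--         if y_elt != last_y:
--             idx.append(i)
--             last_y = y_elt
--     idx.append(len_y - 1)
--     y_proc = [y[i] for i in idx]
--     x_procs = [[x[i] for i in idx] for x in xs]
--     return x_procs, y_proc
-- ===== Notes on version B (the rewrite author's own statement) =====
-- stated objective: simpler
-- what changed: B first collects the list of change-point indices in one pass over y and then materialises y_proc and every x series by mapping those indices, instead of A's interleaved per-element inner loop that appends to every series inside the scan of y.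
import Mathlib
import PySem

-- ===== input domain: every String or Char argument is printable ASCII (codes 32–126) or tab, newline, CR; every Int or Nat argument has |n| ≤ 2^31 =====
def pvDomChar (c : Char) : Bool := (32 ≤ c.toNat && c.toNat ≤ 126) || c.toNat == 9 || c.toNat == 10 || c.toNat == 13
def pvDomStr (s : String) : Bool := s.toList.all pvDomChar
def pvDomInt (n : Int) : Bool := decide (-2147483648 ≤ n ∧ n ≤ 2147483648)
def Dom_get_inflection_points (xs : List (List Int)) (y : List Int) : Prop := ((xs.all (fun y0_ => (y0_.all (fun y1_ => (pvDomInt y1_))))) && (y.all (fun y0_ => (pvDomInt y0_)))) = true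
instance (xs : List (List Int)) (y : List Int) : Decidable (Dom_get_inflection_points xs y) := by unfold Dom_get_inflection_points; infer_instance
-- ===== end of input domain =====

-- B collects the change-point indices in one pass and then maps them over y and each x series,
-- replacing A's interleaved per-series appends inside the scan of y (objective: simpler).
-- A mutates nothing observable; equivalence is about the return value.


-- ===== PORT A =====
-- the 'for i, y_elt in enumerate(y)' loop, carried as structural recursion over the
-- remaining suffix of y with the running index i and the state (x_procs, y_proc, last_y)
def pvALoop (xs : List (List Int)) (i : Nat) (rest : List Int)
    (xp : List (List Int)) (yp : List Int) (last : Option Int) :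
    List (List Int) × List Int × Option Int :=
  match rest with
  | [] => (xp, yp, last)
  | ye :: r =>
    if some ye ≠ last then
      -- 'for j, x in enumerate(xs): x_procs[j].append(x[i])' (x[i] in range under Pre_)
      pvALoop xs (i+1) r (List.zipWith (fun col x => col ++ [x.getD i 0]) xp xs)
        (yp ++ [ye]) (some ye)
    else
      pvALoop xs (i+1) r xp yp last

def get_inflection_points (xs : List (List Int)) (y : List Int) : List (List Int) × List Int :=
  -- trailing 'x_procs[j].append(x[-1])' / 'y_proc.append(y[-1])' (in range under Pre_)
  (List.zipWith (fun col x => col ++ [(PySem.List.pyGet? x (-1)).getD 0])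
      (pvALoop xs 0 y (xs.map (fun _ => ([] : List Int))) [] none).1 xs,
   (pvALoop xs 0 y (xs.map (fun _ => ([] : List Int))) [] none).2.1
      ++ [(PySem.List.pyGet? y (-1)).getD 0])

-- ===== PORT B =====
-- one pass collecting the positions where y changes
def pvBIdx (i : Nat) (rest : List Int) (last : Option Int) : List Nat :=
  match rest with
  | [] => []
  | ye :: r => if some ye ≠ last then i :: pvBIdx (i+1) r (some ye) else pvBIdx (i+1) r last

def get_inflection_points_alt (xs : List (List Int)) (y : List Int) : List (List Int) × List Int :=
  (xs.map (fun x => (pvBIdx 0 y none ++ [y.length - 1]).map (fun i => x.getD i 0)),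
   (pvBIdx 0 y none ++ [y.length - 1]).map (fun i => y.getD i 0))

-- ===== PRECONDITION & SPEC =====
-- Pre_ excludes exactly the raising inputs: empty y (IndexError at y[-1]/x[-1]) and a series of
-- a different length than y (AssertionError); A returns normally on everything else.
def Pre_get_inflection_points (xs : List (List Int)) (y : List Int) : Prop :=
  y ≠ [] ∧ ∀ x ∈ xs, x.length = y.length
instance (xs : List (List Int)) (y : List Int) : Decidable (Pre_get_inflection_points xs y) := by unfold Pre_get_inflection_points; infer_instance
def pvWitness_get_inflection_points : List (List Int) × List Int := ([[10, 20, 30]], [1, 1, 2])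

def Spec_get_inflection_points (xs : List (List Int)) (y : List Int) (out : List (List Int) × List Int) : Prop := out = get_inflection_points_alt xs y
instance (xs : List (List Int)) (y : List Int) (out : List (List Int) × List Int) : Decidable (Spec_get_inflection_points xs y out) := by unfold Spec_get_inflection_points; infer_instance

-- ===== CLAIM (what is proved, stated in full; the proofs are below) =====
def Claim_equal_get_inflection_points : Prop := ∀ (xs : List (List Int)) (y : List Int), Dom_get_inflection_points xs y → Pre_get_inflection_points xs y → Spec_get_inflection_points xs y (get_inflection_points xs y)

-- ===== LEMMAS AND PROOFS =====

-- zipWith that only keeps the left column is the identity when the lengths agree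
theorem pvZipWith_id (f : List Int → List Int → List Int) (hf : ∀ c x, f c x = c)
    (xp xs : List (List Int)) (h : xp.length = xs.length) :
    List.zipWith f xp xs = xp := by
  induction xp generalizing xs with
  | nil => simp
  | cons c cs ih =>
    cases xs with
    | nil => simp at h
    | cons x xs' =>
      simp only [List.zipWith_cons_cons, hf]
      rw [ih xs' (by simpa using h)]

-- appending elementwise twice fuses
theorem pvZipWith_fuse (xp xs : List (List Int)) (f g : List Int → List Int) :
    List.zipWith (fun col x => col ++ g x) (List.zipWith (fun col x => col ++ f x) xp xs) xs
      = List.zipWith (fun col x => col ++ (f x ++ g x)) xp xs := by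
  induction xp generalizing xs with
  | nil => cases xs <;> simp
  | cons c cs ih =>
    cases xs with
    | nil => simp
    | cons x xs' => simp [List.zipWith_cons_cons, ih, List.append_assoc]

-- main invariant: the A-loop appends exactly the values at the indices B collects
theorem pvALoop_eq (xs : List (List Int)) (y : List Int) :
    ∀ (rest : List Int) (i : Nat) (xp : List (List Int)) (yp : List Int) (last : Option Int),
      y.drop i = rest → xp.length = xs.length →
      (pvALoop xs i rest xp yp last).1
          = List.zipWith (fun col x => col ++ (pvBIdx i rest last).map (fun k => x.getD k 0)) xp xs
        ∧ (pvALoop xs i rest xp yp last).2.1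
          = yp ++ (pvBIdx i rest last).map (fun k => y.getD k 0) := by
  intro rest
  induction rest with
  | nil =>
    intro i xp yp last _ hlen
    refine ⟨?_, by simp [pvALoop, pvBIdx]⟩
    simp only [pvALoop, pvBIdx, List.map_nil]
    exact (pvZipWith_id _ (fun c x => by simp) xp xs hlen).symm
  | cons ye r ih =>
    intro i xp yp last hdrop hlen
    have h0 : y[i]? = some ye := by
      have h0' : (y.drop i)[0]? = some ye := by rw [hdrop]; rfl
      rw [List.getElem?_drop] at h0'
      simpa using h0'
    have hdrop' : y.drop (i+1) = r := by
      have := congrArg (List.drop 1) hdrop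
      simpa [List.drop_drop, Nat.add_comm] using this
    by_cases hc : some ye ≠ last
    · simp only [pvALoop, pvBIdx, if_pos hc]
      have hlen' : (List.zipWith (fun col x => col ++ [x.getD i 0]) xp xs).length = xs.length := by
        simp [List.length_zipWith, hlen]
      obtain ⟨h1, h2⟩ := ih (i+1) _ _ _ hdrop' hlen'
      refine ⟨?_, ?_⟩
      · rw [h1, pvZipWith_fuse]
        simp
      · rw [h2]
        simp [List.getD, h0]
    · simp only [pvALoop, pvBIdx, if_neg hc]
      exact ih (i+1) _ _ _ hdrop' hlen

-- zipWith over freshly-created empty columns is a map (functions may be swapped memberwise)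
theorem pvZipWith_map_nil (xs : List (List Int)) (g h : List Int → List Int)
    (hgh : ∀ x ∈ xs, g x = h x) :
    List.zipWith (fun col x => col ++ g x) (xs.map (fun _ => ([] : List Int))) xs
      = xs.map h := by
  induction xs with
  | nil => rfl
  | cons x xs' ih =>
    simp only [List.map_cons, List.zipWith_cons_cons, List.nil_append]
    rw [hgh x (by simp), ih (fun z hz => hgh z (by simp [hz]))]

-- Python's x[-1] on a nonempty list of length n
theorem pvGet_neg_one (x : List Int) (n : Nat) (hx : x.length = n) (hn : n ≠ 0) :
    (PySem.List.pyGet? x (-1)).getD 0 = x.getD (n - 1) 0 := by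
  simp [PySem.List.pyGet?, PySem.List.pyIdx?, hx]
  rw [if_pos (show 1 ≤ n by omega)]
  simp

-- ===== VERDICT (by name: the statement is the Claim_ definition above) =====
theorem get_inflection_points_spec : Claim_equal_get_inflection_points := by
  intro xs y _ hpre
  obtain ⟨hy, hlen⟩ := hpre
  unfold Spec_get_inflection_points get_inflection_points get_inflection_points_alt
  have hn : y.length ≠ 0 := by simpa [List.length_eq_zero_iff] using hy
  obtain ⟨h1, h2⟩ := pvALoop_eq xs y y 0 (xs.map (fun _ => ([] : List Int))) [] none (by simp) (by simp)
  rw [h1, h2, pvZipWith_fuse]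
  refine Prod.ext ?_ ?_
  · refine pvZipWith_map_nil xs _ _ ?_
    intro x hx
    rw [pvGet_neg_one x y.length (hlen x hx) hn]
    simp [List.map_append]
  · simp only [List.nil_append, List.map_append, List.map_cons, List.map_nil]
    rw [pvGet_neg_one y y.length rfl hn]
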